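-- pv_equiv track=rewrite | github.com/HanahKim37/sehwaprograms | pages/004_토너먼트 대진표 생성.py | create_first_round_pairs
-- ===== SOURCE A (Python) =====
-- def create_first_round_pairs(num_teams, bye_teams):
--     """
--     1라운드에서 '부전승 팀'은 제외하고,
--     나머지 팀들을 순서대로 2개씩 짝지어 (A vs B) 매치를 만든다.
--     예) num_teams=12, bye_teams=[3,6,9,12] 이면
--        => 1라운드 후보 = [1,2,4,5,7,8,10,11]
--        => pairs = [(1,2), (4,5), (7,8), (10,11)]
--     """
--     teams = [i for i in range(1, num_teams+1) if i not in bye_teams]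
--     pairs = []
--     # 2개씩 끊어서 매치업 구성
--     for i in range(0, len(teams), 2):
--         # 혹시 팀 수가 홀수라 마지막이 튀면 적절히 처리 필요
--         if i+1 < len(teams):
--             pairs.append( (teams[i], teams[i+1]) )
--         else:
--             # 마지막 한 팀만 남았다면, 강제로 부전승 처리하거나 로직 보강
--             # 여기서는 단순히 pass
--             pass
--     return pairs
-- ===== SOURCE B (Python) =====
-- def create_first_round_pairs(num_teams, bye_teams):
--     # One pass: skip bye teams, hold one pending team, emit a pair when a partner arrives.
--     pairs = []
--     pending = None
--     for i in range(1, num_teams + 1):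
--         if i in bye_teams:
--             continue
--         if pending is None:
--             pending = i
--         else:
--             pairs.append((pending, i))
--             pending = None
--     # a leftover odd team is silently dropped, as in the original
--     return pairs
-- ===== Notes on version B (the rewrite author's own statement) =====
-- stated objective: simpler
-- what changed: Fused A's two phases (build filtered team list, then chunk it by even indices) into a single pass over range(1, num_teams+1) that keeps one pending team and emits a pair when a partner arrives; no intermediate list, no indexing.
import Mathlib
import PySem

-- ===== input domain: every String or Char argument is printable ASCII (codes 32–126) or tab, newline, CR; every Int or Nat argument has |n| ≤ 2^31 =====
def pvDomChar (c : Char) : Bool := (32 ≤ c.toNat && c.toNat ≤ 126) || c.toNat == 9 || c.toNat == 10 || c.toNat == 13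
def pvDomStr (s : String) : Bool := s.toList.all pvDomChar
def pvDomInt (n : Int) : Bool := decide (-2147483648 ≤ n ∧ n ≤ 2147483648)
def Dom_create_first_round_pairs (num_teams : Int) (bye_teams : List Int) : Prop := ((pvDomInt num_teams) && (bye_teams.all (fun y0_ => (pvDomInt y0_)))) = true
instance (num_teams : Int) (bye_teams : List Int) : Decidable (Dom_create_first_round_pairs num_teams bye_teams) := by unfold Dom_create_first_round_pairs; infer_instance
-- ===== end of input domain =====

-- B fuses A's two phases (filtered list, then chunk by even index) into one pass with a
-- single pending slot: simpler, no intermediate list or indexing. Same return value everywhere.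

-- ===== PORT A =====
-- for i in range(0, len(teams), 2): if i+1 < len(teams): pairs.append((teams[i], teams[i+1]))
-- (i is always 0 ≤ i < len here, so teams.getD i 0 is exactly Python's teams[i])
def pvA_loop (teams : List Int) (i : Nat) (pairs : List (Int × Int)) : List (Int × Int) :=
  if i < teams.length then
    if i + 1 < teams.length then
      pvA_loop teams (i + 2) (pairs ++ [(teams.getD i 0, teams.getD (i + 1) 0)])
    else
      pvA_loop teams (i + 2) pairs
  else pairs
termination_by teams.length - i

def create_first_round_pairs (num_teams : Int) (bye_teams : List Int) : List (Int × Int) :=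
  -- teams = [i for i in range(1, num_teams+1) if i not in bye_teams]
  let teams := (PySem.List.pyRange 1 (num_teams + 1) 1).filter (fun i => !bye_teams.contains i)
  pvA_loop teams 0 []

-- ===== PORT B =====
def pvB_step (bye_teams : List Int) (st : List (Int × Int) × Option Int) (i : Int) :
    List (Int × Int) × Option Int :=
  if bye_teams.contains i then st
  else
    match st.2 with
    | none => (st.1, some i)
    | some p => (st.1 ++ [(p, i)], none)

def create_first_round_pairs_alt (num_teams : Int) (bye_teams : List Int) : List (Int × Int) :=
  ((PySem.List.pyRange 1 (num_teams + 1) 1).foldl (pvB_step bye_teams) ([], none)).1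

-- ===== PRECONDITION & SPEC =====
def Spec_create_first_round_pairs (num_teams : Int) (bye_teams : List Int) (out : List (Int × Int)) : Prop := out = create_first_round_pairs_alt num_teams bye_teams
instance (num_teams : Int) (bye_teams : List Int) (out : List (Int × Int)) : Decidable (Spec_create_first_round_pairs num_teams bye_teams out) := by unfold Spec_create_first_round_pairs; infer_instance

-- ===== CLAIM (what is proved, stated in full; the proofs are below) =====
def Claim_equal_create_first_round_pairs : Prop := ∀ (num_teams : Int) (bye_teams : List Int), Dom_create_first_round_pairs num_teams bye_teams → Spec_create_first_round_pairs num_teams bye_teams (create_first_round_pairs num_teams bye_teams)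

-- ===== LEMMAS AND PROOFS =====

-- the common reference: successive disjoint pairs, dropping a leftover odd element
def pvPairUp : List Int → List (Int × Int)
  | a :: b :: ts => (a, b) :: pvPairUp ts
  | _ => []

def pvPendList : Option Int → List Int
  | none => []
  | some p => [p]

theorem pvA_loop_eq (teams : List Int) (i : Nat) (pairs : List (Int × Int)) :
    pvA_loop teams i pairs = pairs ++ pvPairUp (teams.drop i) := by
  rw [pvA_loop]
  by_cases h : i < teams.length
  · by_cases h1 : i + 1 < teams.length
    · rw [if_pos h, if_pos h1, pvA_loop_eq]
      have hd : teams.drop i = teams[i] :: teams[i+1] :: teams.drop (i + 2) := by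
        rw [List.drop_eq_getElem_cons h, List.drop_eq_getElem_cons h1]
      rw [hd]
      simp [pvPairUp, List.getD_eq_getElem?_getD, List.getElem?_eq_getElem h,
        List.getElem?_eq_getElem h1]
    · rw [if_pos h, if_neg h1, pvA_loop_eq]
      have hi : i = teams.length - 1 := by omega
      have hd2 : teams.drop (i + 2) = [] := by
        apply List.drop_eq_nil_of_le; omega
      have hd : teams.drop i = [teams[i]] := by
        rw [List.drop_eq_getElem_cons h]
        have : teams.drop (i + 1) = [] := List.drop_eq_nil_of_le (by omega)
        rw [this]
      rw [hd, hd2]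
      simp [pvPairUp]
  · rw [if_neg h]
    have : teams.drop i = [] := List.drop_eq_nil_of_le (by omega)
    simp [this, pvPairUp]
termination_by teams.length - i

theorem pvB_fold_eq (bye_teams : List Int) (l : List Int) :
    ∀ (pairs : List (Int × Int)) (pending : Option Int),
    (l.foldl (pvB_step bye_teams) (pairs, pending)).1 =
      pairs ++ pvPairUp (pvPendList pending ++ l.filter (fun i => !bye_teams.contains i)) := by
  induction l with
  | nil =>
    intro pairs pending
    cases pending <;> simp [pvPendList, pvPairUp]
  | cons a l ih =>
    intro pairs pending
    by_cases hb : bye_teams.contains a = true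
    · simp only [List.foldl_cons, pvB_step, if_pos hb, List.filter_cons, hb]
      simpa using ih pairs pending
    · cases pending with
      | none =>
        simp only [List.foldl_cons, pvB_step, if_neg hb, List.filter_cons,
          Bool.not_eq_true] at *
        rw [ih pairs (some a)]
        have hm : a ∉ bye_teams := by simpa using hb
        simp [pvPendList, hm]
      | some p =>
        simp only [List.foldl_cons, pvB_step, if_neg hb, List.filter_cons] at *
        rw [ih (pairs ++ [(p, a)]) none]
        have hm : a ∉ bye_teams := by simpa using hb
        simp [pvPendList, hm, pvPairUp]

-- ===== VERDICT (by name: the statement is the Claim_ definition above) =====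
theorem create_first_round_pairs_spec : Claim_equal_create_first_round_pairs := by
  intro num_teams bye_teams _
  unfold Spec_create_first_round_pairs create_first_round_pairs create_first_round_pairs_alt
  rw [pvA_loop_eq, pvB_fold_eq]
  simp [pvPendList]
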